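-- pv_equiv track=rewrite | github.com/emilianoabascal/Metodos-Cuantitativos-y-Simulacion | Actividades en clase/07 Sistemas de colas/program_A01023234.py | createTeams
-- ===== SOURCE A (Python) =====
-- def createTeams(nOfEmployees, sizeOfTeam):
-- 	team = {'NO': 0, 'TrucksAttended':0, 'ShiftDuration':0, 'HadFood': 0, 'Cost': 0, 'numberOfShifts': 0, 'teamSize': sizeOfTeam, 'salaryPerWorker': 0}
-- 	teams = []
-- 	j = 0
-- 	for i in range(nOfEmployees):
-- 		if(i%sizeOfTeam == 0 and i != 0):
-- 			team['NO'] = j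
-- 			teams.append(team.copy())
-- 			j += 1
-- 	return teams
-- ===== SOURCE B (Python) =====
-- def createTeams(nOfEmployees, sizeOfTeam):
--     if nOfEmployees <= 0:
--         return []
--     nTeams = (nOfEmployees - 1) // abs(sizeOfTeam)
--     return [{'NO': j, 'TrucksAttended': 0, 'ShiftDuration': 0, 'HadFood': 0,
--              'Cost': 0, 'numberOfShifts': 0, 'teamSize': sizeOfTeam,
--              'salaryPerWorker': 0} for j in range(nTeams)]
-- ===== Notes on version B (the rewrite author's own statement) =====
-- stated objective: faster
-- what changed: B replaces A's per-employee loop (testing i % sizeOfTeam for every i in range(nOfEmployees)) with the closed-form team count (nOfEmployees-1)//abs(sizeOfTeam) and builds exactly that many rows directly.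
import Mathlib
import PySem

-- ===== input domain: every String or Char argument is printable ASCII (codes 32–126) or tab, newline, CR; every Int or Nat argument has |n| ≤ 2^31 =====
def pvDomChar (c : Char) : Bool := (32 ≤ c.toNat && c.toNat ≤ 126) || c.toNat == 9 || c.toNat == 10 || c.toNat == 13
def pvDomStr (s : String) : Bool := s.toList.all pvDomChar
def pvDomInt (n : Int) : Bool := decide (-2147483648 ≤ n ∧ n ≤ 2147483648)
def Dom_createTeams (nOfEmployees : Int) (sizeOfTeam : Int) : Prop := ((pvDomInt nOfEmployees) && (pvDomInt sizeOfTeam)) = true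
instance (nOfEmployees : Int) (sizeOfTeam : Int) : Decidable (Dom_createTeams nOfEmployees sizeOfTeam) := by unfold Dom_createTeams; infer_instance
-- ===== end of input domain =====

-- B replaces A's per-employee loop (one iteration per employee, appending on multiples of the
-- team size) by a closed-form team count floor((n-1)/|size|) and a direct build of that many rows:
-- objective faster (asymptotic: O(n/|size|) rows built instead of O(n) iterations).

-- ===== PORT A =====
def pvTeamInit (sizeOfTeam : Int) : PySem.Dict String Int :=
  PySem.Dict.ofList [("NO", 0), ("TrucksAttended", 0), ("ShiftDuration", 0), ("HadFood", 0),
    ("Cost", 0), ("numberOfShifts", 0), ("teamSize", sizeOfTeam), ("salaryPerWorker", 0)]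

-- one iteration of A's for-loop; state = (team, teams, j)
def pvStepA (sizeOfTeam : Int)
    (st : PySem.Dict String Int × List (List (String × Int)) × Int) (i : Int) :
    PySem.Dict String Int × List (List (String × Int)) × Int :=
  if PySem.Int.mod i sizeOfTeam = 0 ∧ i ≠ 0 then
    let team := st.1.insert "NO" st.2.2
    (team, st.2.1 ++ [team.items], st.2.2 + 1)
  else st

def createTeams (nOfEmployees : Int) (sizeOfTeam : Int) : List (List (String × Int)) :=
  ((PySem.List.pyRange 0 nOfEmployees 1).foldl (pvStepA sizeOfTeam)
    (pvTeamInit sizeOfTeam, [], 0)).2.1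

-- ===== PORT B =====
def pvRowB (sizeOfTeam : Int) (j : Int) : List (String × Int) :=
  [("NO", j), ("TrucksAttended", 0), ("ShiftDuration", 0), ("HadFood", 0),
   ("Cost", 0), ("numberOfShifts", 0), ("teamSize", sizeOfTeam), ("salaryPerWorker", 0)]

def createTeams_alt (nOfEmployees : Int) (sizeOfTeam : Int) : List (List (String × Int)) :=
  if nOfEmployees ≤ 0 then []
  else
    (PySem.List.pyRange 0 (PySem.Int.floordiv (nOfEmployees - 1) |sizeOfTeam|) 1).map
      (pvRowB sizeOfTeam)

-- ===== PRECONDITION & SPEC =====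
-- Pre_ excludes sizeOfTeam = 0 with nOfEmployees ≥ 1, where A's 'i % sizeOfTeam' raises ZeroDivisionError.
def Pre_createTeams (nOfEmployees : Int) (sizeOfTeam : Int) : Prop :=
  sizeOfTeam ≠ 0 ∨ nOfEmployees ≤ 0
instance (nOfEmployees : Int) (sizeOfTeam : Int) : Decidable (Pre_createTeams nOfEmployees sizeOfTeam) := by unfold Pre_createTeams; infer_instance
def pvWitness_createTeams : Int × Int := (7, 3)

def Spec_createTeams (nOfEmployees : Int) (sizeOfTeam : Int) (out : List (List (String × Int))) : Prop := out = createTeams_alt nOfEmployees sizeOfTeam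
instance (nOfEmployees : Int) (sizeOfTeam : Int) (out : List (List (String × Int))) : Decidable (Spec_createTeams nOfEmployees sizeOfTeam out) := by unfold Spec_createTeams; infer_instance

-- ===== CLAIM (what is proved, stated in full; the proofs are below) =====
def Claim_equal_createTeams : Prop := ∀ (nOfEmployees : Int) (sizeOfTeam : Int), Dom_createTeams nOfEmployees sizeOfTeam → Pre_createTeams nOfEmployees sizeOfTeam → Spec_createTeams nOfEmployees sizeOfTeam (createTeams nOfEmployees sizeOfTeam)

-- ===== LEMMAS AND PROOFS =====

-- the team dict with NO = p (pvTeamInit s = pvTeamD s 0)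
def pvTeamD (s p : Int) : PySem.Dict String Int :=
  PySem.Dict.ofList [("NO", p), ("TrucksAttended", 0), ("ShiftDuration", 0), ("HadFood", 0),
    ("Cost", 0), ("numberOfShifts", 0), ("teamSize", s), ("salaryPerWorker", 0)]

-- number of teams appended after the first m loop iterations
def pvCnt (d m : Nat) : Nat := (m - 1) / d

theorem pvTeamD_insert (s p j : Int) : (pvTeamD s p).insert "NO" j = pvTeamD s j := by
  rfl

theorem pvTeamD_items (s p : Int) : (pvTeamD s p).items = pvRowB s p := by
  rfl

theorem pvLoopA (s : Int) (hs : s ≠ 0) (m : Nat) :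
    (PySem.List.pyRange 0 (m : Int) 1).foldl (pvStepA s) (pvTeamD s 0, [], 0)
    = (pvTeamD s ((pvCnt s.natAbs m - 1 : Nat) : Int),
       (List.range (pvCnt s.natAbs m)).map (fun t : Nat => pvRowB s (t : Int)),
       (pvCnt s.natAbs m : Int)) := by
  induction m with
  | zero => simp [pvCnt]
  | succ m ih =>
    have hd : 1 ≤ s.natAbs := by omega
    have hsplit : PySem.List.pyRange 0 ((m : Int) + 1) 1
        = PySem.List.pyRange 0 (m : Int) 1 ++ [(m : Int)] :=
      PySem.List.pyRange_one_succ_right (by positivity)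
    have hcast : ((m + 1 : Nat) : Int) = (m : Int) + 1 := by push_cast; ring
    rw [hcast, hsplit, List.foldl_append, ih]
    simp only [List.foldl_cons, List.foldl_nil]
    have hcond : (PySem.Int.mod (m : Int) s = 0 ∧ ((m : Int) ≠ 0)) ↔ (s.natAbs ∣ m ∧ m ≠ 0) := by
      rw [PySem.Int.mod_eq_zero_iff_dvd]
      constructor
      · rintro ⟨h1, h2⟩
        refine ⟨?_, by exact_mod_cast h2⟩
        have := Int.natAbs_dvd.mpr h1
        exact_mod_cast (Int.natAbs_dvd.mpr h1 : (s.natAbs : Int) ∣ (m : Int))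
      · rintro ⟨h1, h2⟩
        refine ⟨Int.natAbs_dvd.mp (by exact_mod_cast h1), by exact_mod_cast h2⟩
    by_cases h : s.natAbs ∣ m ∧ m ≠ 0
    · have hcnt : pvCnt s.natAbs (m + 1) = pvCnt s.natAbs m + 1 := by
        unfold pvCnt
        obtain ⟨h1, h2⟩ := h
        have hm1 : m - 1 + 1 = m := by omega
        have hsd : (m - 1 + 1) / s.natAbs = (m - 1) / s.natAbs + if s.natAbs ∣ m - 1 + 1 then 1 else 0 := Nat.succ_div
        rw [hm1] at hsd
        simp only [Nat.add_sub_cancel, hsd, if_pos h1]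
      rw [pvStepA, if_pos (hcond.mpr h)]
      simp only [pvTeamD_insert, pvTeamD_items, hcnt, Prod.mk.injEq, Nat.add_sub_cancel]
      refine ⟨trivial, ?_, by push_cast; ring⟩
      simp [List.range_succ]
    · have hcnt : pvCnt s.natAbs (m + 1) = pvCnt s.natAbs m := by
        unfold pvCnt
        by_cases hm : m = 0
        · subst hm; simp
        · have hm1 : m - 1 + 1 = m := by omega
          have hnd : ¬ s.natAbs ∣ m := fun hdd => h ⟨hdd, hm⟩
          have hsd : (m - 1 + 1) / s.natAbs = (m - 1) / s.natAbs + if s.natAbs ∣ m - 1 + 1 then 1 else 0 := Nat.succ_div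
          rw [hm1] at hsd
          simp only [Nat.add_sub_cancel, hsd, if_neg hnd, Nat.add_zero]
      rw [pvStepA, if_neg (fun hc => h (hcond.mp hc))]
      rw [hcnt]

-- ===== VERDICT (by name: the statement is the Claim_ definition above) =====
theorem createTeams_spec : Claim_equal_createTeams := by
  intro n s _ hpre
  unfold Spec_createTeams createTeams createTeams_alt
  by_cases hn : n ≤ 0
  · rw [PySem.List.pyRange_one_eq_nil (by omega), if_pos hn]
    simp
  · have hs : s ≠ 0 := by
      cases hpre with
      | inl h => exact h
      | inr h => omega
    have hm : n = ((n.toNat : Nat) : Int) := by omega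
    rw [if_neg hn, hm, show pvTeamInit s = pvTeamD s 0 from rfl, pvLoopA s hs n.toNat]
    have habs : |s| = ((s.natAbs : Nat) : Int) := by
      rw [Int.abs_eq_natAbs]
    have hsub : ((n.toNat : Nat) : Int) - 1 = ((n.toNat - 1 : Nat) : Int) := by omega
    rw [habs, hsub, PySem.Int.floordiv_natCast, PySem.List.pyRange_zero_natCast]
    simp [pvCnt, Function.comp_def]
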